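-- pv_equiv track=rewrite | github.com/pedroivoal/Dessoft | Exercicios/06.Lista/36.Lista em zigue-zague.py | lista_em_zigue_zague
-- ===== SOURCE A (Python) =====
-- def lista_em_zigue_zague(seq):
--
--     if len(seq)==0 or len(seq)==1 or len(seq)==2 and seq[0]!=seq[1]:
--         return True
--     elif len(seq)<=2:
--         return False
--
--     i = 0
--     while i < len(seq)-2:
--
--         if seq[i] < seq[i+1] and seq[i+2] < seq[i+1] or seq[i] > seq[i+1] and seq[i+2] > seq[i+1]:
--             i += 1
--         else:
--             return False
--
--     return True
-- ===== SOURCE B (Python) =====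
-- def lista_em_zigue_zague(seq):
--     dirs = [(1 if a < b else (-1 if a > b else 0)) for a, b in zip(seq, seq[1:])]
--     return all(d != 0 for d in dirs) and all(x == -y for x, y in zip(dirs, dirs[1:]))
-- ===== Notes on version B (the rewrite author's own statement) =====
-- stated objective: simpler
-- what changed: Replaces the length-case analysis plus an index-driven while loop over triples by one derived array of pairwise directions checked for nonzero entries and opposite adjacent entries; the short-length cases need no special handling.
import Mathlib
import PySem

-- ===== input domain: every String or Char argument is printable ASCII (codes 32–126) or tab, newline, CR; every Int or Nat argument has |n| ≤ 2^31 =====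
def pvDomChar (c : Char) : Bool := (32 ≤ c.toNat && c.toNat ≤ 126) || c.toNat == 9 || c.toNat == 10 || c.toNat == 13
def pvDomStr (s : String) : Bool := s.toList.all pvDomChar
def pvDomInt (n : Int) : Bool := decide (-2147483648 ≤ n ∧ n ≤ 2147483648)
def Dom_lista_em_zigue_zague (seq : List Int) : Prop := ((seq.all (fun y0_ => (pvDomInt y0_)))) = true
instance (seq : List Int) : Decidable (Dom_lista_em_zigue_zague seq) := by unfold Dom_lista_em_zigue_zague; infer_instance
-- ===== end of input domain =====

-- B replaces A's length-case analysis and index-driven while loop by a single derived list of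
-- pairwise directions checked for nonzero and opposite-adjacent entries (objective: simpler).
-- ===== PORT A =====
-- while loop of A: i walks while i < len-2, checking the peak/valley condition at each triple.
-- seq[i], seq[i+1], seq[i+2] are always in range here (i < len-2), so getD's default is never used.
def lzLoop (seq : List Int) (i : Nat) : Bool :=
  if _h : i < seq.length - 2 then
    if (decide (seq.getD i 0 < seq.getD (i+1) 0) && decide (seq.getD (i+2) 0 < seq.getD (i+1) 0)) ||
       (decide (seq.getD i 0 > seq.getD (i+1) 0) && decide (seq.getD (i+2) 0 > seq.getD (i+1) 0)) then
      lzLoop seq (i+1)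
    else false
  else true
termination_by seq.length - 2 - i

-- seq[0]!=seq[1] is only evaluated when len==2 (short-circuit), so getD is in range there.
def lista_em_zigue_zague (seq : List Int) : Bool :=
  if seq.length == 0 || seq.length == 1 || (seq.length == 2 && (seq.getD 0 0 != seq.getD 1 0)) then
    true
  else if seq.length ≤ 2 then
    false
  else
    lzLoop seq 0

-- ===== PORT B =====
-- direction of one adjacent pair: 1 if a < b else (-1 if a > b else 0)
def lzDir (a b : Int) : Int := if a < b then 1 else if a > b then -1 else 0

def lista_em_zigue_zague_alt (seq : List Int) : Bool :=
  let dirs := (seq.zip seq.tail).map (fun p => lzDir p.1 p.2)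
  dirs.all (fun d => d != 0) && (dirs.zip dirs.tail).all (fun p => p.1 == -p.2)

-- ===== PRECONDITION & SPEC =====
def Spec_lista_em_zigue_zague (seq : List Int) (out : Bool) : Prop := out = lista_em_zigue_zague_alt seq
instance (seq : List Int) (out : Bool) : Decidable (Spec_lista_em_zigue_zague seq out) := by unfold Spec_lista_em_zigue_zague; infer_instance

-- ===== CLAIM (what is proved, stated in full; the proofs are below) =====
def Claim_equal_lista_em_zigue_zague : Prop := ∀ (seq : List Int), Dom_lista_em_zigue_zague seq → Spec_lista_em_zigue_zague seq (lista_em_zigue_zague seq)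

-- ===== LEMMAS AND PROOFS =====

-- structural version of A's triple scan
def lzZig3 : List Int → Bool
  | a :: b :: c :: t =>
      ((decide (a < b) && decide (c < b)) || (decide (a > b) && decide (c > b))) && lzZig3 (b :: c :: t)
  | _ => true

theorem lzZig3_short (l : List Int) (h : l.length ≤ 2) : lzZig3 l = true := by
  match l with
  | [] => rfl
  | [a] => rfl
  | [a, b] => rfl
  | a :: b :: c :: t => simp at h

theorem lzLoop_eq_zig3 (seq : List Int) (i : Nat) : lzLoop seq i = lzZig3 (seq.drop i) := by
  fun_induction lzLoop seq i with
  | case1 i h hc ih =>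
      have h1 : i < seq.length := by omega
      have h2 : i + 1 < seq.length := by omega
      have h3 : i + 2 < seq.length := by omega
      have hd : seq.drop i = seq[i] :: seq[i+1] :: seq[i+2] :: seq.drop (i+3) := by
        rw [← List.getElem_cons_drop h1, ← List.getElem_cons_drop h2, ← List.getElem_cons_drop h3]
      have hd2 : seq.drop (i+1) = seq[i+1] :: seq[i+2] :: seq.drop (i+3) := by
        rw [← List.getElem_cons_drop h2, ← List.getElem_cons_drop h3]
      rw [ih, hd, hd2, lzZig3]
      simp [List.getD_eq_getElem?_getD, h1, h2, h3] at hc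
      simp [hc]
  | case2 i h hc =>
      have h1 : i < seq.length := by omega
      have h2 : i + 1 < seq.length := by omega
      have h3 : i + 2 < seq.length := by omega
      have hd : seq.drop i = seq[i] :: seq[i+1] :: seq[i+2] :: seq.drop (i+3) := by
        rw [← List.getElem_cons_drop h1, ← List.getElem_cons_drop h2, ← List.getElem_cons_drop h3]
      rw [hd, lzZig3]
      simp [List.getD_eq_getElem?_getD, h1, h2, h3] at hc
      simp
      intro hcon
      exfalso; omega
  | case3 i h =>
      symm
      apply lzZig3_short
      rw [List.length_drop]
      omega

-- one step of B on a list with at least three elements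
theorem alt_cons3 (a b c : Int) (t : List Int) :
    lista_em_zigue_zague_alt (a :: b :: c :: t) =
      (((decide (a < b) && decide (c < b)) || (decide (a > b) && decide (c > b))) &&
        lista_em_zigue_zague_alt (b :: c :: t)) := by
  simp only [lista_em_zigue_zague_alt, List.tail, List.zip_cons_cons, List.map_cons, List.all_cons]
  rcases lt_trichotomy a b with h | h | h <;> rcases lt_trichotomy b c with g | g | g <;>
    simp [lzDir, h, g, lt_asymm]

theorem alt_eq_zig3 (a b c : Int) (t : List Int) :
    lista_em_zigue_zague_alt (a :: b :: c :: t) = lzZig3 (a :: b :: c :: t) := by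
  induction t generalizing a b c with
  | nil =>
      rcases lt_trichotomy a b with h | h | h <;> rcases lt_trichotomy b c with g | g | g <;>
        simp [lista_em_zigue_zague_alt, lzZig3, lzDir, h, g, lt_asymm]
  | cons d t ih =>
      rw [alt_cons3, lzZig3, ih]

-- ===== VERDICT (by name: the statement is the Claim_ definition above) =====
theorem lista_em_zigue_zague_spec : Claim_equal_lista_em_zigue_zague := by
  intro seq _
  unfold Spec_lista_em_zigue_zague
  match seq with
  | [] => decide
  | [a] => simp [lista_em_zigue_zague, lista_em_zigue_zague_alt]
  | [a, b] =>
      rcases lt_trichotomy a b with h | h | h <;>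
        simp [lista_em_zigue_zague, lista_em_zigue_zague_alt, lzDir, h, lt_asymm,
          ne_of_lt, ne_of_gt]
  | a :: b :: c :: t =>
      rw [alt_eq_zig3]
      have : lista_em_zigue_zague (a :: b :: c :: t) = lzLoop (a :: b :: c :: t) 0 := by
        simp [lista_em_zigue_zague]
      rw [this, lzLoop_eq_zig3, List.drop_zero]
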